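-- pv_equiv track=rewrite | github.com/martinbartolo/adventofcode | 2023/Day13/day13.py | rows_above_reflection
-- ===== SOURCE A (Python) =====
-- def rows_above_reflection(pattern: list[str]):
--     rows_above = 1
--     seen_stack: list[str] = []
--     for i in range(len(pattern) - 1):
--         seen_stack.append(pattern[i])
--         if pattern[i] == pattern[i + 1]:
--             for j in range(len(seen_stack) + 1):
--                 if i + j + 1 == len(pattern) or len(seen_stack) - j - 1 < 0:
--                     return rows_above
--                 if seen_stack[len(seen_stack) - j - 1] != pattern[i + 1 + j]:
--                     break
--         rows_above += 1
--     return -1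
-- ===== SOURCE B (Python) =====
-- def rows_above_reflection(pattern: list[str]):
--     # Z-algorithm approach: a mirror axis at k means the block of rows touching
--     # the nearest boundary is a palindrome; detect all such palindromes with two
--     # linear Z-function passes over pattern and its reverse, then take the first k.
--     n = len(pattern)
--     if n < 2:
--         return -1
--
--     def zfunc(s):
--         m = len(s)
--         z = [0] * m
--         z[0] = m
--         l = r = 0
--         for i in range(1, m):
--             k = 0
--             if i < r:
--                 k = min(r - i, z[i - l])
--             while i + k < m and s[k] == s[i + k]:
--                 k += 1
--             z[i] = k
--             if i + k > r:
--                 l, r = i, i + k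
--         return z
--
--     sep = object()  # never equal to any row
--     rev = pattern[::-1]
--     z1 = zfunc(pattern + [sep] + rev)  # prefix palindromes: z1[2n+1-2k] == 2k
--     z2 = zfunc(rev + [sep] + pattern)  # suffix palindromes: z2[2k+1] == 2(n-k)
--     for k in range(1, n):
--         if 2 * k <= n:
--             if z1[2 * n + 1 - 2 * k] == 2 * k:
--                 return k
--         else:
--             if z2[2 * k + 1] == 2 * (n - k):
--                 return k
--     return -1
-- ===== Notes on version B (the rewrite author's own statement) =====
-- stated objective: alternative
-- what changed: Replaces A's per-axis outward verification loop (worst-case O(n^2) row comparisons) by two linear Z-function passes over the row list and its reverse, after which each candidate axis is tested with a single O(1) array lookup (an axis is a boundary-touching palindromic block, i.e. a reversed prefix/suffix match detected by the Z-array).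
import Mathlib
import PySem

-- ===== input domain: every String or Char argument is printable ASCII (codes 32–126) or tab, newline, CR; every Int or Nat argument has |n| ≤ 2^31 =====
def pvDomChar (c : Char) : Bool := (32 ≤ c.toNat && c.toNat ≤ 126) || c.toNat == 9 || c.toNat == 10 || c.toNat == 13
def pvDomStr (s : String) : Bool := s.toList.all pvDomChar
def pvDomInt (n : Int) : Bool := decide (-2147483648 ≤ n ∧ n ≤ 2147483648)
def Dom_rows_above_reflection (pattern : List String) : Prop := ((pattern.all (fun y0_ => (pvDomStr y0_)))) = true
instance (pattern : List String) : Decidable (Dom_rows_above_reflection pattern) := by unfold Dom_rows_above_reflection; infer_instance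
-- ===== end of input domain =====

-- B replaces A's per-axis outward verification by two linear Z-function passes
-- (over the rows and their reverse), so each candidate axis is one array lookup.

-- ===== PORT A =====
-- inner 'for j in range(len(seen_stack)+1)': some r = 'return r', none = break / loop end
def pvInnerA (pattern seen : List String) (i : Nat) (rows : Int) : Nat → Nat → Option Int
  | _, 0 => none
  | j, fuel+1 =>
    if i + j + 1 = pattern.length ∨ seen.length < j + 1 then some rows
    else if seen.getD (seen.length - j - 1) "" ≠ pattern.getD (i + 1 + j) "" then none
    else pvInnerA pattern seen i rows (j+1) fuel

-- outer 'for i in range(len(pattern) - 1)'; all indices are in range when accessed, so getD is exact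
def pvOuterA (pattern : List String) : Nat → Int → List String → Nat → Int
  | _, _, _, 0 => -1
  | i, rows, seen, fuel+1 =>
    let seen' := seen ++ [pattern.getD i ""]
    if pattern.getD i "" = pattern.getD (i+1) "" then
      match pvInnerA pattern seen' i rows 0 (seen'.length + 1) with
      | some r => r
      | none => pvOuterA pattern (i+1) (rows+1) seen' fuel
    else pvOuterA pattern (i+1) (rows+1) seen' fuel

def rows_above_reflection (pattern : List String) : Int :=
  pvOuterA pattern 0 1 [] (pattern.length - 1)

-- ===== PORT B =====
-- Rows are Option String: 'some row'; the Python sentinel 'object()' (equal to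
-- nothing but itself) is 'none'.  All Python indices and z-values here are
-- provably nonnegative and in range, so Nat indexing with getD is exact.

-- the 'while i + k < m and s[k] == s[i + k]: k += 1' loop of zfunc
def pvZWhile (s : List (Option String)) (i : Nat) : Nat → Nat → Nat
  | k, 0 => k
  | k, fuel+1 =>
    if i + k < s.length ∧ s.getD k none = s.getD (i + k) none
    then pvZWhile s i (k+1) fuel else k

-- the 'for i in range(1, m)' loop of zfunc, state (z, l, r)
def pvZLoop (s : List (Option String)) : Nat → List Nat → Nat → Nat → Nat → List Nat
  | 0, z, _, _, _ => z
  | fuel+1, z, i, l, r =>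
    let k0 := if i < r then min (r - i) (z.getD (i - l) 0) else 0
    let k := pvZWhile s i k0 s.length
    let z' := z.set i k
    if i + k > r then pvZLoop s fuel z' (i+1) i (i+k) else pvZLoop s fuel z' (i+1) l r

-- zfunc: z = [0]*m; z[0] = m; then the loop
def pvZfunc (s : List (Option String)) : List Nat :=
  pvZLoop s (s.length - 1) ((List.replicate s.length 0).set 0 s.length) 1 0 0

-- the final 'for k in range(1, n)' scan
def pvBScan (z1 z2 : List Nat) (n : Nat) : Nat → Nat → Int
  | _, 0 => -1
  | k, fuel+1 =>
    if 2*k ≤ n then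
      if z1.getD (2*n+1-2*k) 0 = 2*k then (k : Int) else pvBScan z1 z2 n (k+1) fuel
    else
      if z2.getD (2*k+1) 0 = 2*(n-k) then (k : Int) else pvBScan z1 z2 n (k+1) fuel

def rows_above_reflection_alt (pattern : List String) : Int :=
  let n := pattern.length
  if n < 2 then -1 else
  let rev := pattern.reverse
  let z1 := pvZfunc (pattern.map some ++ [none] ++ rev.map some)
  let z2 := pvZfunc (rev.map some ++ [none] ++ pattern.map some)
  pvBScan z1 z2 n 1 (n-1)

-- ===== PRECONDITION & SPEC =====
def Spec_rows_above_reflection (pattern : List String) (out : Int) : Prop := out = rows_above_reflection_alt pattern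
instance (pattern : List String) (out : Int) : Decidable (Spec_rows_above_reflection pattern out) := by unfold Spec_rows_above_reflection; infer_instance

-- ===== CLAIM (what is proved, stated in full; the proofs are below) =====
def Claim_equal_rows_above_reflection : Prop := ∀ (pattern : List String), Dom_rows_above_reflection pattern → Spec_rows_above_reflection pattern (rows_above_reflection pattern)

-- ===== LEMMAS AND PROOFS =====

-- longest common prefix of two lists
def pvLcp : List (Option String) → List (Option String) → Nat
  | a::as, b::bs => if a = b then pvLcp as bs + 1 else 0
  | _, _ => 0

lemma pvLcp_nil_right (s : List (Option String)) : pvLcp s [] = 0 := by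
  cases s <;> rfl

lemma pvLcp_le_right : ∀ s t : List (Option String), pvLcp s t ≤ t.length := by
  intro s t
  induction s generalizing t with
  | nil => cases t <;> simp [pvLcp]
  | cons a as ih =>
    cases t with
    | nil => simp [pvLcp]
    | cons b bs =>
      simp only [pvLcp]
      split_ifs
      · simpa using Nat.succ_le_succ (ih bs)
      · simp

lemma pvLcp_self : ∀ s : List (Option String), pvLcp s s = s.length := by
  intro s
  induction s with
  | nil => rfl
  | cons a as ih => simp [pvLcp, ih]

lemma pvGetD_drop (s : List (Option String)) (i j : Nat) (d : Option String) :
    (s.drop i).getD j d = s.getD (i+j) d := by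
  induction s generalizing i with
  | nil => simp
  | cons a as ih =>
    cases i with
    | zero => simp
    | succ i =>
      simp only [List.drop_succ_cons]
      rw [ih i]
      simp [Nat.succ_add]

lemma pvLcp_agree (d : Option String) :
    ∀ (s t : List (Option String)) (j : Nat), j < pvLcp s t → s.getD j d = t.getD j d := by
  intro s
  induction s with
  | nil => intro t j h; simp [pvLcp] at h
  | cons a as ih =>
    intro t j h
    cases t with
    | nil => simp [pvLcp] at h
    | cons b bs =>
      simp only [pvLcp] at h
      split_ifs at h with hab
      · cases j with
        | zero => simpa using hab
        | succ j => simpa using ih bs j (by omega)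
      · omega

lemma pvLe_lcp (d : Option String) :
    ∀ (s t : List (Option String)) (k : Nat), k ≤ s.length → k ≤ t.length →
      (∀ j < k, s.getD j d = t.getD j d) → k ≤ pvLcp s t := by
  intro s
  induction s with
  | nil =>
    intro t k h1 _ _
    have : k = 0 := by simpa using h1
    simp [this]
  | cons a as ih =>
    intro t k h1 h2 h3
    cases k with
    | zero => omega
    | succ k =>
      cases t with
      | nil => simp at h2
      | cons b bs =>
        have hab : a = b := by simpa using h3 0 (by omega)
        simp only [pvLcp, if_pos hab]
        have := ih bs k (by simpa using h1) (by simpa using h2)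
          (fun j hj => by simpa using h3 (j+1) (by omega))
        omega

lemma pvLcp_split : ∀ (k : Nat) (s t : List (Option String)), k ≤ pvLcp s t →
    pvLcp s t = k + pvLcp (s.drop k) (t.drop k) := by
  intro k
  induction k with
  | zero => simp
  | succ k ih =>
    intro s t h
    cases s with
    | nil => simp [pvLcp] at h
    | cons a as =>
      cases t with
      | nil => simp [pvLcp_nil_right] at h
      | cons b bs =>
        simp only [pvLcp] at h ⊢
        split_ifs at h ⊢ with hab
        · have := ih as bs (by omega)
          simp only [List.drop_succ_cons]
          omega
        · omega

lemma pvZWhile_eq (s : List (Option String)) :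
    ∀ (fuel i k : Nat), s.length ≤ i + k + fuel → 1 ≤ i →
      pvZWhile s i k fuel = k + pvLcp (s.drop k) (s.drop (i+k)) := by
  intro fuel
  induction fuel with
  | zero =>
    intro i k h hi
    have : s.drop (i+k) = [] := List.drop_eq_nil_of_le (by omega)
    rw [this, pvLcp_nil_right]
    rfl
  | succ fuel ih =>
    intro i k h hi
    rw [pvZWhile]
    by_cases hc : i + k < s.length ∧ s.getD k none = s.getD (i + k) none
    · rw [if_pos hc]
      obtain ⟨hlt, heq⟩ := hc
      have hk : k < s.length := by omega
      have hdk : s.drop k = s[k] :: s.drop (k+1) := List.drop_eq_getElem_cons hk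
      have hdik : s.drop (i+k) = s[i+k] :: s.drop (i+k+1) := List.drop_eq_getElem_cons hlt
      have hheads : s[k] = s[i+k] := by
        rwa [List.getD_eq_getElem s none hk, List.getD_eq_getElem s none hlt] at heq
      rw [hdk, hdik]
      simp only [pvLcp, if_pos hheads]
      rw [ih i (k+1) (by omega) hi]
      have : i + (k+1) = i + k + 1 := by omega
      rw [this]
      omega
    · rw [if_neg hc]
      by_cases hlt : i + k < s.length
      · have heq : ¬ s.getD k none = s.getD (i + k) none := fun h' => hc ⟨hlt, h'⟩
        have hk : k < s.length := by omega
        rw [List.drop_eq_getElem_cons hk, List.drop_eq_getElem_cons hlt]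
        simp only [pvLcp]
        rw [if_neg]
        · omega
        · intro h'
          exact heq (by rw [List.getD_eq_getElem s none hk, List.getD_eq_getElem s none hlt]; exact h')
      · rw [List.drop_eq_nil_of_le (show s.length ≤ i + k by omega), pvLcp_nil_right]
        omega

lemma pvSet_getD_ne (z : List Nat) (i j k : Nat) (h : i ≠ j) :
    (z.set i k).getD j 0 = z.getD j 0 := by
  by_cases hj : j < z.length
  · rw [List.getD_eq_getElem _ _ (by simpa using hj), List.getD_eq_getElem _ _ hj]
    rw [List.getElem_set]
    simp [h]
  · rw [List.getD_eq_default _ _ (by simpa using hj), List.getD_eq_default _ _ (by omega)]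

lemma pvZLoop_frozen (s : List (Option String)) :
    ∀ (fuel : Nat) (z : List Nat) (i l r : Nat), s.length ≤ i →
      ∀ j < s.length, (pvZLoop s fuel z i l r).getD j 0 = z.getD j 0 := by
  intro fuel
  induction fuel with
  | zero => intro z i l r _ j _; rfl
  | succ fuel ih =>
    intro z i l r hi j hj
    rw [pvZLoop]
    split_ifs <;>
      rw [ih _ (i+1) _ _ (by omega) j hj, pvSet_getD_ne z i j _ (by omega)]

lemma pvZLoop_eq (s : List (Option String)) :
    ∀ (fuel i : Nat) (z : List Nat) (l r : Nat), 1 ≤ i → s.length ≤ i + fuel →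
      z.length = s.length →
      (∀ j < i, z.getD j 0 = pvLcp s (s.drop j)) →
      l ≤ i → r ≤ s.length → r - l ≤ pvLcp s (s.drop l) → (l = 0 → r = 0) →
      ∀ j < s.length, (pvZLoop s fuel z i l r).getD j 0 = pvLcp s (s.drop j) := by
  intro fuel
  induction fuel with
  | zero =>
    intro i z l r _ hfuel _ hz _ _ _ _ j hj
    exact hz j (by omega)
  | succ fuel ih =>
    intro i z l r hi hfuel hzlen hz hl hr hbox hl0 j hj
    by_cases hiL : i < s.length
    · rw [pvZLoop]
      set k0 := if i < r then min (r - i) (z.getD (i - l) 0) else 0 with hk0def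
      have hk0 : k0 ≤ pvLcp s (s.drop i) := by
        rw [hk0def]
        split_ifs with hir
        · -- shortcut: agreement up to min (r-i) (z[i-l])
          have hl1 : 1 ≤ l := by
            by_contra h
            have : l = 0 := by omega
            have := hl0 this; omega
          have hil : i - l < i := by omega
          have hzil : z.getD (i - l) 0 = pvLcp s (s.drop (i - l)) := hz _ hil
          rw [hzil]
          apply pvLe_lcp none
          · omega
          · rw [List.length_drop]; omega
          · intro j' hj'
            rw [pvGetD_drop]
            have h1 : s.getD (i + j') none = s.getD ((i - l) + j') none := by
              have hb : (i - l) + j' < pvLcp s (s.drop l) := by omega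
              have := pvLcp_agree none s (s.drop l) ((i-l)+j') hb
              rw [pvGetD_drop] at this
              rw [show l + ((i-l)+j') = i + j' from by omega] at this
              exact this.symm
            have h2 : s.getD ((i - l) + j') none = s.getD j' none := by
              have hb : j' < pvLcp s (s.drop (i-l)) := by omega
              have := pvLcp_agree none s (s.drop (i-l)) j' hb
              rw [pvGetD_drop] at this
              exact this.symm
            rw [h1, h2]
        · omega
      have hkval : pvZWhile s i k0 s.length = pvLcp s (s.drop i) := by
        rw [pvZWhile_eq s s.length i k0 (by omega) hi]
        have := pvLcp_split k0 s (s.drop i) hk0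
        rw [List.drop_drop] at this
        omega
      rw [hkval]
      set k := pvLcp s (s.drop i) with hkdef
      have hkle : k ≤ s.length - i := by
        have := pvLcp_le_right s (s.drop i)
        rw [List.length_drop] at this
        omega
      have hz' : ∀ j' < i + 1, (z.set i k).getD j' 0 = pvLcp s (s.drop j') := by
        intro j' hj'
        by_cases hji : j' = i
        · subst hji
          rw [List.getD_eq_getElem _ _ (by rw [List.length_set]; omega)]
          simp [hkdef]
        · rw [pvSet_getD_ne z i j' k (fun h => hji h.symm)]
          exact hz j' (by omega)
      split_ifs with hikr
      · exact ih (i+1) (z.set i k) i (i+k) (by omega) (by omega)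
          (by rw [List.length_set]; exact hzlen) hz' (by omega) (by omega)
          (by simp [hkdef]) (by omega) j hj
      · exact ih (i+1) (z.set i k) l r (by omega) (by omega)
          (by rw [List.length_set]; exact hzlen) hz' (by omega) hr hbox hl0 j hj
    · rw [pvZLoop_frozen s (fuel+1) z i l r (by omega) j hj]
      exact hz j (by omega)

lemma pvZfunc_eq (s : List (Option String)) (hm : 1 ≤ s.length) :
    ∀ p < s.length, (pvZfunc s).getD p 0 = pvLcp s (s.drop p) := by
  intro p hp
  unfold pvZfunc
  apply pvZLoop_eq s (s.length - 1) 1 _ 0 0 (by omega) (by omega)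
  · rw [List.length_set, List.length_replicate]
  · intro j hj
    have : j = 0 := by omega
    subst this
    rw [List.getD_eq_getElem _ _ (by rw [List.length_set, List.length_replicate]; omega)]
    simp [pvLcp_self]
  · omega
  · omega
  · simp
  · intro; rfl
  · exact hp

-- direct axis-scan reference form (proof helper bridging the two ports)
def pvScan (p : List String) : Nat → Nat → Int
  | _, 0 => -1
  | k, fuel+1 =>
    if ∀ j < min k (p.length - k), p.getD (k-1-j) "" = p.getD (k+j) ""
    then (k : Int) else pvScan p (k+1) fuel

-- ---- A = pvScan ----
lemma innerA_eq (pattern : List String) (i : Nat) (rows : Int)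
    (hi : i + 1 < pattern.length) :
    ∀ (fuel j : Nat), j ≤ min (i+1) (pattern.length - (i+1)) →
      min (i+1) (pattern.length - (i+1)) < j + fuel →
      pvInnerA pattern (pattern.take (i+1)) i rows j fuel =
        (if ∀ j', j ≤ j' → j' < min (i+1) (pattern.length - (i+1)) →
              pattern.getD (i - j') "" = pattern.getD (i+1+j') "" then some rows else none) := by
  intro fuel
  induction fuel with
  | zero => intro j h1 h2; omega
  | succ fuel ih =>
    intro j h1 h2
    set m := min (i+1) (pattern.length - (i+1)) with hm
    have hlen : (pattern.take (i+1)).length = i+1 := by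
      simp [List.length_take]; omega
    rw [pvInnerA]
    rcases Nat.lt_or_ge j m with hj | hj
    · have hb : ¬ (i + j + 1 = pattern.length ∨ (pattern.take (i+1)).length < j + 1) := by
        rw [hlen]; omega
      rw [if_neg hb]
      have hidx : (pattern.take (i+1)).length - j - 1 = i - j := by omega
      have hget : (pattern.take (i+1)).getD (i - j) "" = pattern.getD (i - j) "" := by
        have h1' : i - j < i + 1 := by omega
        have h2' : i - j < pattern.length := by omega
        rw [List.getD_eq_getElem _ _ (by rw [hlen]; omega), List.getD_eq_getElem _ _ h2']
        simp [List.getElem_take]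
      rw [hidx, hget]
      by_cases hne : pattern.getD (i - j) "" = pattern.getD (i+1+j) ""
      · rw [if_neg (by simpa using hne)]
        rw [ih (j+1) (by omega) (by omega)]
        congr 1
        · apply propext; constructor
          · intro h j' hj1 hj2
            rcases Nat.eq_or_lt_of_le hj1 with rfl | hlt
            · exact hne
            · exact h j' (by omega) hj2
          · intro h j' hj1 hj2; exact h j' (by omega) hj2
      · rw [if_pos (by simpa using hne)]
        rw [if_neg]
        intro h; exact hne (h j (le_refl _) hj)
    · have hjm : j = m := by omega
      have hb : i + j + 1 = pattern.length ∨ (pattern.take (i+1)).length < j + 1 := by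
        rw [hlen]; omega
      rw [if_pos hb, if_pos]
      intro j' hj1 hj2; omega

lemma outer_eq (pattern : List String) :
    ∀ (fuel i : Nat), i + fuel + 1 ≤ pattern.length →
      pvOuterA pattern i ((i : Int)+1) (pattern.take i) fuel = pvScan pattern (i+1) fuel := by
  intro fuel
  induction fuel with
  | zero => intro i h; rfl
  | succ fuel ih =>
    intro i h
    have hi : i + 1 < pattern.length := by omega
    have hseen : pattern.take i ++ [pattern.getD i ""] = pattern.take (i+1) := by
      rw [List.take_add_one]
      congr 1
      rw [List.getElem?_eq_getElem (show i < pattern.length by omega)]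
      rw [List.getD_eq_getElem _ _ (show i < pattern.length by omega)]
      rfl
    rw [pvOuterA, pvScan]
    simp only [hseen]
    set m := min (i+1) (pattern.length - (i+1)) with hm
    have hm1 : 1 ≤ m := by omega
    have hlen : (pattern.take (i+1)).length = i + 1 := by simp; omega
    have hcond : (∀ j < m, pattern.getD (i+1-1-j) "" = pattern.getD ((i+1)+j) "") ↔
        (∀ j', 0 ≤ j' → j' < m → pattern.getD (i - j') "" = pattern.getD (i+1+j') "") := by
      constructor
      · intro hcc j' _ hj'
        have := hcc j' hj'
        rw [show i+1-1-j' = i - j' from by omega] at this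
        exact this
      · intro hcc j hj
        rw [show i+1-1-j = i - j from by omega]
        exact hcc j (by omega) hj
    have hcast : ((i : Int) + 1) + 1 = (((i+1 : Nat) : Int)) + 1 := by push_cast; ring
    have hihs : pvOuterA pattern (i+1) ((i:Int)+1+1) (pattern.take (i+1)) fuel
        = pvScan pattern (i+1+1) fuel := by
      rw [hcast]; exact ih (i+1) (by omega)
    by_cases hg : pattern.getD i "" = pattern.getD (i+1) ""
    · rw [if_pos hg]
      rw [hlen]
      rw [innerA_eq pattern i ((i:Int)+1) hi (i+1+1) 0 (by omega) (by omega)]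
      by_cases hc : ∀ j', 0 ≤ j' → j' < m → pattern.getD (i - j') "" = pattern.getD (i+1+j') ""
      · rw [if_pos hc, if_pos (hcond.mpr hc)]
        push_cast; ring
      · rw [if_neg hc, if_neg (fun hs => hc (hcond.mp hs))]
        exact hihs
    · rw [if_neg hg]
      have hcnd : ¬ (∀ j < m, pattern.getD (i+1-1-j) "" = pattern.getD ((i+1)+j) "") := by
        intro hc
        have := hc 0 (by omega)
        simp at this
        exact hg this
      rw [if_neg hcnd]
      exact hihs

-- ---- B = pvScan ----

lemma pvS1_getD_left (pattern : List String) (q : List (Option String)) (j : Nat)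
    (hj : j < pattern.length) :
    (pattern.map some ++ q).getD j none = some (pattern.getD j "") := by
  rw [List.getD_eq_getElem _ _ (by simp; omega), List.getD_eq_getElem _ _ hj]
  rw [List.getElem_append_left (by simpa using hj)]
  simp

lemma pvS1_getD_right (pattern q : List String) (j : Nat)
    (hj : j < q.length) :
    (pattern.map some ++ [none] ++ q.map some).getD (pattern.length + 1 + j) none
      = some (q.getD j "") := by
  rw [List.getD_append_right (pattern.map some ++ [none]) (q.map some) none
    (pattern.length + 1 + j)
    (by simp only [List.length_append, List.length_map, List.length_cons, List.length_nil]; omega)]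
  have : pattern.length + 1 + j - (pattern.map some ++ [none]).length = j := by simp
  rw [this]
  rw [List.getD_eq_getElem _ _ (by simpa using hj), List.getD_eq_getElem _ _ hj]
  simp

lemma pvRev_getD (pattern : List String) (j : Nat) (hj : j < pattern.length) :
    pattern.reverse.getD j "" = pattern.getD (pattern.length - 1 - j) "" := by
  rw [List.getD_eq_getElem _ _ (by simpa using hj),
      List.getD_eq_getElem _ _ (by omega)]
  rw [List.getElem_reverse]

-- lcp condition at offset p expressed pointwise
lemma pvLcp_drop_iff (s : List (Option String)) (p w : Nat)
    (hw : s.length = p + w) :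
    (pvLcp s (s.drop p) = w ↔ ∀ j < w, s.getD j none = s.getD (p+j) none) := by
  have hlen : (s.drop p).length = w := by rw [List.length_drop]; omega
  constructor
  · intro h j hj
    have := pvLcp_agree none s (s.drop p) j (by omega)
    rw [pvGetD_drop] at this
    exact this
  · intro h
    have hge : w ≤ pvLcp s (s.drop p) := by
      apply pvLe_lcp none
      · omega
      · omega
      · intro j hj
        rw [pvGetD_drop]
        exact h j hj
    have hle := pvLcp_le_right s (s.drop p)
    omega

-- case 2k ≤ n: z1 test ⇔ mirrored-rows condition at axis k
lemma pvCond1 (pattern : List String) (k : Nat) (h1 : 1 ≤ k)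
    (h2 : 2*k ≤ pattern.length) :
    ((pvZfunc (pattern.map some ++ [none] ++ pattern.reverse.map some)).getD
        (2*pattern.length+1-2*k) 0 = 2*k)
      ↔ (∀ j < min k (pattern.length - k),
          pattern.getD (k-1-j) "" = pattern.getD (k+j) "") := by
  have hslen : (pattern.map some ++ [none] ++ pattern.reverse.map some).length
      = 2*pattern.length+1 := by simp; omega
  rw [pvZfunc_eq _ (by omega) (2*pattern.length+1-2*k) (by omega)]
  rw [pvLcp_drop_iff _ (2*pattern.length+1-2*k) (2*k) (by omega)]
  have hmin : min k (pattern.length - k) = k := by omega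
  rw [hmin]
  have hL : ∀ j < 2*k, (pattern.map some ++ [none] ++ pattern.reverse.map some).getD j none
      = some (pattern.getD j "") := by
    intro j hj
    rw [List.append_assoc]
    exact pvS1_getD_left pattern _ j (by omega)
  have hR : ∀ j < 2*k, (pattern.map some ++ [none] ++ pattern.reverse.map some).getD
      (2*pattern.length+1-2*k+j) none = some (pattern.getD (2*k-1-j) "") := by
    intro j hj
    rw [show 2*pattern.length+1-2*k+j = pattern.length + 1 + (pattern.length-2*k+j) from by omega]
    rw [pvS1_getD_right pattern pattern.reverse (pattern.length-2*k+j) (by simp; omega)]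
    rw [pvRev_getD pattern (pattern.length-2*k+j) (by omega)]
    congr 2
    omega
  constructor
  · intro h j hj
    have := h (k+j) (by omega)
    rw [hL (k+j) (by omega), hR (k+j) (by omega)] at this
    rw [show 2*k-1-(k+j) = k-1-j from by omega] at this
    exact (Option.some_inj.mp this).symm
  · intro h j hj
    rw [hL j hj, hR j hj]
    rcases Nat.lt_or_ge j k with hjk | hjk
    · have := h (k-1-j) (by omega)
      rw [show k-1-(k-1-j) = j from by omega, show k+(k-1-j) = 2*k-1-j from by omega] at this
      rw [this]
    · have := h (j-k) (by omega)
      rw [show k-1-(j-k) = 2*k-1-j from by omega, show k+(j-k) = j from by omega] at this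
      rw [this]

-- case 2k > n: z2 test ⇔ mirrored-rows condition at axis k
lemma pvCond2 (pattern : List String) (k : Nat) (h1 : k < pattern.length)
    (h2 : pattern.length < 2*k) :
    ((pvZfunc (pattern.reverse.map some ++ [none] ++ pattern.map some)).getD
        (2*k+1) 0 = 2*(pattern.length - k))
      ↔ (∀ j < min k (pattern.length - k),
          pattern.getD (k-1-j) "" = pattern.getD (k+j) "") := by
  have hslen : (pattern.reverse.map some ++ [none] ++ pattern.map some).length
      = 2*pattern.length+1 := by simp; omega
  rw [pvZfunc_eq _ (by omega) (2*k+1) (by omega)]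
  rw [pvLcp_drop_iff _ (2*k+1) (2*(pattern.length-k)) (by omega)]
  have hmin : min k (pattern.length - k) = pattern.length - k := by omega
  rw [hmin]
  have hL : ∀ j < 2*(pattern.length-k),
      (pattern.reverse.map some ++ [none] ++ pattern.map some).getD j none
      = some (pattern.getD (pattern.length-1-j) "") := by
    intro j hj
    rw [List.append_assoc]
    rw [pvS1_getD_left pattern.reverse _ j (by simp; omega)]
    rw [pvRev_getD pattern j (by omega)]
  have hR : ∀ j < 2*(pattern.length-k),
      (pattern.reverse.map some ++ [none] ++ pattern.map some).getD (2*k+1+j) none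
      = some (pattern.getD (2*k-pattern.length+j) "") := by
    intro j hj
    have hidx : 2*k+1+j = pattern.reverse.length + 1 + (2*k-pattern.length+j) := by
      simp; omega
    rw [hidx]
    rw [pvS1_getD_right pattern.reverse pattern (2*k-pattern.length+j) (by omega)]
  constructor
  · intro h j hj
    have := h (pattern.length-k+j) (by omega)
    rw [hL (pattern.length-k+j) (by omega), hR (pattern.length-k+j) (by omega)] at this
    rw [show pattern.length-1-(pattern.length-k+j) = k-1-j from by omega,
        show 2*k-pattern.length+(pattern.length-k+j) = k+j from by omega] at this
    exact Option.some_inj.mp this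
  · intro h j hj
    rw [hL j hj, hR j hj]
    rcases Nat.lt_or_ge j (pattern.length-k) with hjm | hjm
    · have := h (pattern.length-k-1-j) (by omega)
      rw [show k-1-(pattern.length-k-1-j) = 2*k-pattern.length+j from by omega,
          show k+(pattern.length-k-1-j) = pattern.length-1-j from by omega] at this
      rw [this]
    · have := h (j-(pattern.length-k)) (by omega)
      rw [show k-1-(j-(pattern.length-k)) = pattern.length-1-j from by omega,
          show k+(j-(pattern.length-k)) = 2*k-pattern.length+j from by omega] at this
      rw [this]

lemma scan_eq (pattern : List String) (_h2 : 2 ≤ pattern.length) :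
    ∀ (fuel k : Nat), 1 ≤ k → k + fuel ≤ pattern.length →
      pvBScan (pvZfunc (pattern.map some ++ [none] ++ pattern.reverse.map some))
              (pvZfunc (pattern.reverse.map some ++ [none] ++ pattern.map some))
              pattern.length k fuel
        = pvScan pattern k fuel := by
  intro fuel
  induction fuel with
  | zero => intro k _ _; rfl
  | succ fuel ih =>
    intro k hk1 hkf
    have hkn : k < pattern.length := by omega
    rw [pvBScan, pvScan]
    by_cases hcase : 2*k ≤ pattern.length
    · rw [if_pos hcase]
      by_cases hc : ∀ j < min k (pattern.length - k),
          pattern.getD (k-1-j) "" = pattern.getD (k+j) ""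
      · rw [if_pos ((pvCond1 pattern k hk1 hcase).mpr hc), if_pos hc]
      · rw [if_neg (fun h => hc ((pvCond1 pattern k hk1 hcase).mp h)), if_neg hc]
        exact ih (k+1) (by omega) (by omega)
    · rw [if_neg hcase]
      by_cases hc : ∀ j < min k (pattern.length - k),
          pattern.getD (k-1-j) "" = pattern.getD (k+j) ""
      · rw [if_pos ((pvCond2 pattern k hkn (by omega)).mpr hc), if_pos hc]
      · rw [if_neg (fun h => hc ((pvCond2 pattern k hkn (by omega)).mp h)), if_neg hc]
        exact ih (k+1) (by omega) (by omega)

-- ===== VERDICT (by name: the statement is the Claim_ definition above) =====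
theorem rows_above_reflection_spec : Claim_equal_rows_above_reflection := by
  intro pattern _
  unfold Spec_rows_above_reflection rows_above_reflection rows_above_reflection_alt
  by_cases h2 : pattern.length < 2
  · rw [if_pos h2]
    interval_cases h : pattern.length <;> simp_all [pvOuterA]
  · rw [if_neg h2]
    have hA := outer_eq pattern (pattern.length - 1) 0 (by omega)
    simp only [List.take_zero] at hA
    rw [show ((0:Nat):Int) + 1 = 1 from by norm_num] at hA
    rw [hA]
    exact (scan_eq pattern (by omega) (pattern.length - 1) 1 (by omega) (by omega)).symm
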